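-- pv_equiv track=rewrite | github.com/IsaacG/Advent-of-Code | 2020/06.py | part2
-- ===== SOURCE A (Python) =====
-- from typing import List
--
-- def part2(data: List[str]) -> int:
--   """Part 2: count num of chars found on all lines."""
--   total = 0
--   for r in data:
--     records = r.split()
--     s = set(records.pop())
--     while records:
--       s &= set(records.pop())
--     total += len(s)
--   return total
-- ===== SOURCE B (Python) =====
-- from typing import List
--
-- def part2(data: List[str]) -> int:
--   """Part 2: count num of chars found on all lines (presence-count table instead of running set intersection)."""
--   total = 0
--   for r in data:
--     records = r.split()
--     counts = {}
--     for rec in records: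
--       for c in set(rec):
--         counts[c] = counts.get(c, 0) + 1
--     total += sum(1 for c in set(records[0]) if counts[c] == len(records))
--   return total
-- ===== Notes on version B (the rewrite author's own statement) =====
-- stated objective: alternative
-- what changed: Replaces the destructive pop-and-intersect set loop with a per-character presence counter (a frequency table over each line's distinct chars) followed by a threshold pass over the first line's distinct chars, counting those whose presence equals the number of lines.
import Mathlib
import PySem

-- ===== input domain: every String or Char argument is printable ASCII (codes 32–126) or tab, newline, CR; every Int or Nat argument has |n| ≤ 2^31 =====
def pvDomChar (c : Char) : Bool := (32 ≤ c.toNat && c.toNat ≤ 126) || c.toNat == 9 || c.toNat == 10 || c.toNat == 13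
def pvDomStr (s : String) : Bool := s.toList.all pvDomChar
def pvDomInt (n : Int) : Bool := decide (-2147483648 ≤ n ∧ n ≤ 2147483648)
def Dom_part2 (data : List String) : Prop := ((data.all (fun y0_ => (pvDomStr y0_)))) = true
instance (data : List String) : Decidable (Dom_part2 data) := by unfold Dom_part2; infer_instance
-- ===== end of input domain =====

-- B replaces A's destructive pop-and-intersect set loop by a per-character presence counter plus
-- a threshold pass; equivalence is proved on inputs where every group has at least one word.

-- ===== PORT A =====
-- 'while records: s &= set(records.pop())'
def part2While (s : PySem.Set Char) (records : List String) : PySem.Set Char :=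
  match h : PySem.List.pop? records (-1) with
  | none => s
  | some xr => part2While (PySem.Set.inter s (PySem.Set.ofList xr.1.toList)) xr.2
termination_by records.length
decreasing_by
  have := PySem.List.length_of_pop?_eq_some records h; omega

def part2 (data : List String) : Int :=
  data.foldl (fun total r =>
    let records := PySem.Str.split₀ r
    -- 's = set(records.pop())' : none = IndexError (excluded by Pre_part2)
    match PySem.List.pop? records (-1) with
    | none => total
    | some xr => total + PySem.Set.len (part2While (PySem.Set.ofList xr.1.toList) xr.2)) 0

-- ===== PORT B =====
def part2_alt (data : List String) : Int :=
  data.foldl (fun total r =>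
    let records := PySem.Str.split₀ r
    -- counts[c] = counts.get(c, 0) + 1, for c in set(rec), for rec in records
    let counts := records.foldl (fun d rec =>
      (PySem.Set.ofList rec.toList).foldl (fun d c => d.insert c (d.getD c 0 + 1)) d)
      PySem.Dict.empty
    -- sum(1 for c in set(records[0]) if counts[c] == len(records)); records[0]: none = IndexError
    -- (excluded by Pre_part2); counts[c]: c ∈ records[0] so the key is present and getD _ 0 is exact
    match PySem.List.pyGet? records 0 with
    | none => total
    | some first =>
        total + (((PySem.Set.ofList first.toList).countP
          (fun c => counts.getD c 0 == (records.length : Int)) : Nat) : Int)) 0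

-- ===== PRECONDITION & SPEC =====
-- Pre_ excludes exactly the inputs where A raises IndexError: any data containing a group whose
-- split() is empty (empty or whitespace-only string); B raises the same IndexError at records[0].
def Pre_part2 (data : List String) : Prop := ∀ r ∈ data, PySem.Str.split₀ r ≠ []
instance (data : List String) : Decidable (Pre_part2 data) := by unfold Pre_part2; infer_instance

def pvWitness_part2 : List String := ["ab a b", "c"]

def Spec_part2 (data : List String) (out : Int) : Prop := out = part2_alt data
instance (data : List String) (out : Int) : Decidable (Spec_part2 data out) := by unfold Spec_part2; infer_instance

-- ===== CLAIM (what is proved, stated in full; the proofs are below) =====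
def Claim_equal_part2 : Prop := ∀ (data : List String), Dom_part2 data → Pre_part2 data → Spec_part2 data (part2 data)

-- ===== LEMMAS AND PROOFS =====

theorem part2While_nil (s : PySem.Set Char) : part2While s [] = s := by
  rw [part2While]
  rfl

theorem part2While_append (s : PySem.Set Char) (xs : List String) (x : String) :
    part2While s (xs ++ [x]) = part2While (PySem.Set.inter s (PySem.Set.ofList x.toList)) xs := by
  rw [part2While]
  split
  next heq => rw [PySem.List.pop?_last] at heq; cases heq
  next xr heq => rw [PySem.List.pop?_last] at heq; cases heq; rfl

theorem mem_part2While (recs : List String) (s : PySem.Set Char) (c : Char) :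
    c ∈ part2While s recs ↔ c ∈ s ∧ ∀ rec ∈ recs, c ∈ rec.toList := by
  induction recs using List.reverseRecOn generalizing s with
  | nil => simp [part2While_nil]
  | append_singleton xs x ih =>
      rw [part2While_append, ih]
      simp [PySem.Set.mem_inter, PySem.Set.mem_ofList]
      constructor
      · rintro ⟨⟨hs, hx⟩, hall⟩
        exact ⟨hs, fun rec h => h.elim (hall rec) (fun e => e ▸ hx)⟩
      · rintro ⟨hs, hall⟩
        exact ⟨⟨hs, hall x (Or.inr rfl)⟩, fun rec h => hall rec (Or.inl h)⟩

theorem nodup_part2While (recs : List String) (s : PySem.Set Char) (h : s.Nodup) :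
    (part2While s recs).Nodup := by
  induction recs using List.reverseRecOn generalizing s with
  | nil => simpa [part2While_nil] using h
  | append_singleton xs x ih =>
      rw [part2While_append]
      exact ih _ (PySem.Set.nodup_inter _ _ h)

theorem count_ofList (l : List Char) (c : Char) :
    (PySem.Set.ofList l).count c = if c ∈ l then 1 else 0 := by
  by_cases h : c ∈ l
  · simp [h]
  · simp [h, List.count_eq_zero_of_not_mem (fun hc => h ((PySem.Set.mem_ofList l c).mp hc))]

theorem count_flat (records : List String) (c : Char) :
    (records.flatMap (fun rec => PySem.Set.ofList rec.toList)).count c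
      = records.countP (fun rec => decide (c ∈ rec.toList)) := by
  induction records with
  | nil => simp
  | cons r rest ih =>
      simp [List.flatMap_cons, List.count_append, List.countP_cons, ih, count_ofList]
      by_cases h : c ∈ r.toList <;> simp [h] <;> omega

theorem foldl_flat {α β : Type} (g : β → List α) (f : PySem.Dict Char Int → α → PySem.Dict Char Int)
    (l : List β) (init : PySem.Dict Char Int) :
    (l.flatMap g).foldl f init = l.foldl (fun d rec => (g rec).foldl f d) init := by
  induction l generalizing init with
  | nil => rfl
  | cons r rest ih => simp [List.flatMap_cons, List.foldl_append, ih]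

theorem counts_eq_counter (records : List String) :
    records.foldl (fun d rec =>
      (PySem.Set.ofList rec.toList).foldl (fun d c => d.insert c (d.getD c 0 + 1)) d)
      PySem.Dict.empty
    = PySem.Dict.counter (records.flatMap (fun rec => PySem.Set.ofList rec.toList)) := by
  rw [← PySem.Dict.foldl_insert_getD_add_one_eq_counter]
  exact (foldl_flat (fun rec : String => PySem.Set.ofList rec.toList)
    (fun d c => d.insert c (d.getD c 0 + 1)) records PySem.Dict.empty).symm

theorem length_eq_of_nodup_of_mem_iff {l₁ l₂ : List Char} (h₁ : l₁.Nodup) (h₂ : l₂.Nodup)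
    (h : ∀ c, c ∈ l₁ ↔ c ∈ l₂) : l₁.length = l₂.length := by
  rw [← List.toFinset_card_of_nodup h₁, ← List.toFinset_card_of_nodup h₂]
  congr 1
  ext c
  simp [h c]

theorem group_eq (xs : List String) (x : String) (f : String) (hf : f ∈ xs ++ [x]) :
    PySem.Set.len (part2While (PySem.Set.ofList x.toList) xs)
      = (((PySem.Set.ofList f.toList).countP
          (fun c => (PySem.Dict.counter ((xs ++ [x]).flatMap (fun rec => PySem.Set.ofList rec.toList))).getD c 0
            == ((xs ++ [x]).length : Int)) : Nat) : Int) := by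
  have hpred : ∀ c : Char,
      (((PySem.Dict.counter ((xs ++ [x]).flatMap (fun rec => PySem.Set.ofList rec.toList))).getD c 0
          == (((xs ++ [x]).length : Nat) : Int)) = true)
      ↔ (decide (∀ rec ∈ xs ++ [x], c ∈ rec.toList) = true) := by
    intro c
    rw [PySem.Dict.getD_counter, count_flat]
    simp only [beq_iff_eq, decide_eq_true_eq]
    constructor
    · intro h
      have h' : (xs ++ [x]).countP (fun rec => decide (c ∈ rec.toList)) = (xs ++ [x]).length := by
        exact_mod_cast h
      have hall := List.countP_eq_length.mp h'
      intro rec hr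
      simpa using hall rec hr
    · intro h
      have h' : (xs ++ [x]).countP (fun rec => decide (c ∈ rec.toList)) = (xs ++ [x]).length :=
        List.countP_eq_length.mpr (fun rec hr => by simpa using h rec hr)
      exact_mod_cast h'
  rw [List.countP_congr (fun c _ => hpred c)]
  have hlen : PySem.Set.len (part2While (PySem.Set.ofList x.toList) xs)
      = ((part2While (PySem.Set.ofList x.toList) xs).length : Int) := rfl
  rw [hlen, List.countP_eq_length_filter]
  congr 1
  apply length_eq_of_nodup_of_mem_iff
  · exact nodup_part2While _ _ (PySem.Set.nodup_ofList _)
  · exact (PySem.Set.nodup_ofList _).filter _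
  · intro c
    rw [mem_part2While, List.mem_filter, PySem.Set.mem_ofList, PySem.Set.mem_ofList]
    constructor
    · rintro ⟨hx, hall⟩
      have hallrec : ∀ rec ∈ xs ++ [x], c ∈ rec.toList := by
        intro rec hr
        rcases List.mem_append.mp hr with h | h
        · exact hall rec h
        · rw [List.mem_singleton.mp h]; exact hx
      exact ⟨hallrec f hf, decide_eq_true hallrec⟩
    · rintro ⟨-, hall⟩
      have hall' := of_decide_eq_true hall
      exact ⟨hall' x (by simp), fun rec hr => hall' rec (by simp [hr])⟩

theorem main_loop (data : List String) (h : Pre_part2 data) (total : Int) :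
    data.foldl (fun total r =>
      let records := PySem.Str.split₀ r
      match PySem.List.pop? records (-1) with
      | none => total
      | some xr => total + PySem.Set.len (part2While (PySem.Set.ofList xr.1.toList) xr.2)) total
    = data.foldl (fun total r =>
      let records := PySem.Str.split₀ r
      let counts := records.foldl (fun d rec =>
        (PySem.Set.ofList rec.toList).foldl (fun d c => d.insert c (d.getD c 0 + 1)) d)
        PySem.Dict.empty
      match PySem.List.pyGet? records 0 with
      | none => total
      | some first =>
          total + (((PySem.Set.ofList first.toList).countP
            (fun c => counts.getD c 0 == (records.length : Int)) : Nat) : Int)) total := by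
  induction data generalizing total with
  | nil => rfl
  | cons r rest ih =>
      have hr : PySem.Str.split₀ r ≠ [] := h r (by simp)
      obtain ⟨xs, x, hx⟩ := List.eq_nil_or_concat (PySem.Str.split₀ r) |>.resolve_left hr
      simp only [List.foldl_cons]
      rw [ih (fun r hr => h r (by simp [hr]))]
      congr 1
      rw [hx, List.concat_eq_append] at *
      obtain ⟨hd, tl, hcons⟩ : ∃ hd tl, xs ++ [x] = hd :: tl := by
        cases hxx : xs ++ [x] with
        | nil => simp at hxx
        | cons hd tl => exact ⟨hd, tl, rfl⟩
      simp only [PySem.List.pop?_last, counts_eq_counter]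
      simp only [hcons, PySem.List.pyGet?_zero, List.getElem?_cons_zero]
      rw [← hcons, group_eq xs x hd (hcons ▸ List.mem_cons_self ..)]

-- ===== VERDICT (by name: the statement is the Claim_ definition above) =====
theorem part2_spec : Claim_equal_part2 := by
  intro data _ hpre
  unfold Spec_part2 part2 part2_alt
  exact main_loop data hpre 0
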